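-- pv_equiv track=rewrite | github.com/kototronik/signalDUPLI | converter to bin/durationsToBin.py | decode_duration
-- ===== SOURCE A (Python) =====
-- def decode_duration(code):
--     """Converts a string of characters (f, c, e, digits) into microseconds."""
--     duration = 0
--     for char in code:
--         if char == 'f':
--             duration += 4
--         elif char == 'c':
--             duration += 2
--         elif char == 'e':
--             duration += 3
--         else:
--             duration += 1
--     return duration
-- ===== SOURCE B (Python) =====
-- def decode_duration(code):
--     """Converts a string of characters (f, c, e, digits) into microseconds."""
--     counts = {}
--     for char in code:
--         counts[char] = counts.get(char, 0) + 1
--     return len(code) + 3 * counts.get('f', 0) + counts.get('c', 0) + 2 * counts.get('e', 0)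
-- ===== Notes on version B (the rewrite author's own statement) =====
-- stated objective: alternative
-- what changed: Replaced the branching accumulation loop with a frequency table built in one pass plus a closed-form weighted sum (baseline 1 per char, +3 per 'f', +1 per 'c', +2 per 'e').
import Mathlib
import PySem

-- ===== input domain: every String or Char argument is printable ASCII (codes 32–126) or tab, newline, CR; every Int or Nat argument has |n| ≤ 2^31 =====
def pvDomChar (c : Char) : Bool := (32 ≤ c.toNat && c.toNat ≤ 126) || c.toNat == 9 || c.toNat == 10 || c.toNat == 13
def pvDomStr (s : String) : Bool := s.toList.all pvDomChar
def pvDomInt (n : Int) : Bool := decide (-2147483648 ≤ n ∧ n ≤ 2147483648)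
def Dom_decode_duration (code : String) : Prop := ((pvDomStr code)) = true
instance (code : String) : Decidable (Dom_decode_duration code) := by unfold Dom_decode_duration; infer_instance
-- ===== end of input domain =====

-- B replaces A's branching accumulation loop by a frequency table plus a closed-form
-- weighted sum (alternative decomposition, same O(n) cost).

-- ===== PORT A =====
def decode_duration (code : String) : Int :=
  code.toList.foldl (fun duration char =>
    if char = 'f' then duration + 4
    else if char = 'c' then duration + 2
    else if char = 'e' then duration + 3
    else duration + 1) 0

-- ===== PORT B =====
def decode_duration_alt (code : String) : Int :=
  let counts : PySem.Dict Char Int :=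
    code.toList.foldl (fun d ch => d.insert ch (d.getD ch 0 + 1)) PySem.Dict.empty
  (PySem.Str.len code : Int)
    + 3 * counts.getD 'f' 0 + counts.getD 'c' 0 + 2 * counts.getD 'e' 0

-- ===== PRECONDITION & SPEC =====
def Spec_decode_duration (code : String) (out : Int) : Prop := out = decode_duration_alt code
instance (code : String) (out : Int) : Decidable (Spec_decode_duration code out) := by unfold Spec_decode_duration; infer_instance

-- ===== CLAIM (what is proved, stated in full; the proofs are below) =====
def Claim_equal_decode_duration : Prop := ∀ (code : String), Dom_decode_duration code → Spec_decode_duration code (decode_duration code)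

-- ===== LEMMAS AND PROOFS =====
theorem decode_duration_foldl (cs : List Char) (a : Int) :
    cs.foldl (fun duration char =>
      if char = 'f' then duration + 4
      else if char = 'c' then duration + 2
      else if char = 'e' then duration + 3
      else duration + 1) a
    = a + cs.length + 3 * cs.count 'f' + cs.count 'c' + 2 * cs.count 'e' := by
  induction cs generalizing a with
  | nil => simp
  | cons x xs ih =>
    simp only [List.foldl_cons, ih, List.count_cons, List.length_cons]
    by_cases hf : x = 'f' <;> by_cases hc : x = 'c' <;> by_cases he : x = 'e' <;>
      simp_all <;> ring

-- ===== VERDICT (by name: the statement is the Claim_ definition above) =====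
theorem decode_duration_spec : Claim_equal_decode_duration := by
  intro code _
  unfold Spec_decode_duration decode_duration decode_duration_alt
  simp only [PySem.Dict.getD_foldl_insert_add_one, PySem.Dict.getD_empty,
    PySem.Str.len_eq, decode_duration_foldl]
  ring
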